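-- pv_equiv track=rewrite | github.com/rprovost11-sketch/Lisp | pythonslisp/extensions/strings.py | _cl_capitalize
-- ===== SOURCE A (Python) =====
-- def _cl_capitalize( s: str ) -> str:
--    """CL word-boundary capitalize: first alpha/digit in a word → upper,
-- rest → lower.  Non-alphanumeric characters end the current word."""
--    result   = []
--    in_word  = False
--    for c in s:
--       if c.isalpha() or c.isdigit():
--          result.append( c.upper() if not in_word else c.lower() )
--          in_word = True
--       else:
--          result.append( c )
--          in_word = False
--    return ''.join( result )
-- ===== SOURCE B (Python) =====
-- def _cl_capitalize(s: str) -> str: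
--     """Run-based rewrite: split s into maximal runs of word chars
--     (alpha/digit) and non-word chars; upper-case the head of each word
--     run, lower-case its tail, copy non-word runs verbatim."""
--     def is_word(c):
--         return c.isalpha() or c.isdigit()
--
--     pieces = []
--     i, n = 0, len(s)
--     while i < n:
--         j = i
--         if is_word(s[i]):
--             while j < n and is_word(s[j]):
--                 j += 1
--             pieces.append(s[i].upper() + s[i + 1:j].lower())
--         else:
--             while j < n and not is_word(s[j]):
--                 j += 1
--             pieces.append(s[i:j])
--         i = j
--     return ''.join(pieces)
-- ===== Notes on version B (the rewrite author's own statement) =====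
-- stated objective: alternative
-- what changed: Replaced A's per-character in_word state machine (flag carried across the loop) with a run decomposition: scan maximal word / non-word runs and transform each run wholesale (head upper + tail lower, or verbatim copy).
import Mathlib
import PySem

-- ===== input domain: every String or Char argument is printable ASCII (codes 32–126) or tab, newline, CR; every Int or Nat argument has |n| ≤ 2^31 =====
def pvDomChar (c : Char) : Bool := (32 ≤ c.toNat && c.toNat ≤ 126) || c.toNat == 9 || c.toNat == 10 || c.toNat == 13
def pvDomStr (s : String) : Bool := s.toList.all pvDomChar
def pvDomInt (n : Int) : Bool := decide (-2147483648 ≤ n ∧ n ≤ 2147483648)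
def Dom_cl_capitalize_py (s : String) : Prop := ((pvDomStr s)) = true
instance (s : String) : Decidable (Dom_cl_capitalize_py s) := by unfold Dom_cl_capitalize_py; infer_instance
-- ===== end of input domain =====

-- B replaces A's per-character in_word state machine by a maximal-run decomposition
-- (word runs get head-upper + tail-lower, non-word runs are copied); objective: alternative.

-- ===== PORT A =====
-- per-character loop with in_word flag, result list accumulated by append
def cl_capitalize_py (s : String) : String :=
  let st := s.toList.foldl
    (fun (acc : List Char × Bool) c =>
      if PySem.Chars.isalpha c || PySem.Chars.isdigit c then
        (acc.1 ++ [if !acc.2 then PySem.Chars.upperChar c else PySem.Chars.lowerChar c], true)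
      else
        (acc.1 ++ [c], false))
    ([], false)
  String.mk st.1

-- ===== PORT B =====
def pvIsWord (c : Char) : Bool := PySem.Chars.isalpha c || PySem.Chars.isdigit c

-- maximal-run scan: a word run becomes upper(head) ++ lower(tail-of-run), a non-word run is copied
def pvAltGo : List Char → List Char
  | [] => []
  | c :: rest =>
    if pvIsWord c then
      PySem.Chars.upperChar c ::
        (PySem.Chars.lower (rest.takeWhile pvIsWord) ++ pvAltGo (rest.dropWhile pvIsWord))
    else
      c :: (rest.takeWhile (fun x => !pvIsWord x) ++ pvAltGo (rest.dropWhile (fun x => !pvIsWord x)))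
  termination_by l => l.length
  decreasing_by
    · exact Nat.lt_succ_of_le (List.length_dropWhile_le _ _)
    · exact Nat.lt_succ_of_le (List.length_dropWhile_le _ _)

def cl_capitalize_py_alt (s : String) : String := String.mk (pvAltGo s.toList)

-- ===== PRECONDITION & SPEC =====
def Spec_cl_capitalize_py (s : String) (out : String) : Prop := out = cl_capitalize_py_alt s
instance (s : String) (out : String) : Decidable (Spec_cl_capitalize_py s out) := by unfold Spec_cl_capitalize_py; infer_instance

-- ===== CLAIM (what is proved, stated in full; the proofs are below) =====
def Claim_equal_cl_capitalize_py : Prop := ∀ (s : String), Dom_cl_capitalize_py s → Spec_cl_capitalize_py s (cl_capitalize_py s)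

-- ===== LEMMAS AND PROOFS =====

-- recursive reading of A's state machine
def pvARec (b : Bool) : List Char → List Char
  | [] => []
  | c :: rest =>
    if pvIsWord c then
      (if !b then PySem.Chars.upperChar c else PySem.Chars.lowerChar c) :: pvARec true rest
    else
      c :: pvARec false rest

theorem pvFoldl_eq_aRec (l : List Char) (acc : List Char) (b : Bool) :
    (l.foldl
      (fun (acc : List Char × Bool) c =>
        if PySem.Chars.isalpha c || PySem.Chars.isdigit c then
          (acc.1 ++ [if !acc.2 then PySem.Chars.upperChar c else PySem.Chars.lowerChar c], true)
        else
          (acc.1 ++ [c], false))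
      (acc, b)).1 = acc ++ pvARec b l := by
  induction l generalizing acc b with
  | nil => simp [pvARec]
  | cons c rest ih =>
    by_cases h : (PySem.Chars.isalpha c || PySem.Chars.isdigit c) = true
    · rw [List.foldl_cons, if_pos h, ih]
      simp [pvARec, pvIsWord, h]
    · rw [List.foldl_cons, if_neg h, ih]
      simp [pvARec, pvIsWord, Bool.or_eq_true, not_or] at h ⊢
      simp [h.1, h.2]

-- inside a word run the machine lower-cases and stays in_word
theorem pvARec_true (l : List Char) :
    pvARec true l =
      PySem.Chars.lower (l.takeWhile pvIsWord) ++ pvARec false (l.dropWhile pvIsWord) := by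
  induction l with
  | nil => simp [pvARec, PySem.Chars.lower]
  | cons c rest ih =>
    by_cases h : pvIsWord c
    · simp [pvARec, h, PySem.Chars.lower, ih]
    · have hc : pvIsWord c = false := by simpa using h
      simp [hc, PySem.Chars.lower, pvARec]

-- through a non-word run the machine copies and stays out of word
theorem pvARec_false (l : List Char) :
    pvARec false l =
      l.takeWhile (fun x => !pvIsWord x) ++ pvARec false (l.dropWhile (fun x => !pvIsWord x)) := by
  induction l with
  | nil => simp [pvARec]
  | cons c rest ih =>
    by_cases h : pvIsWord c
    · simp [h, pvARec]
    · have hc : pvIsWord c = false := by simpa using h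
      simp [pvARec, hc, ih]

theorem pvARec_eq_altGo (l : List Char) : pvARec false l = pvAltGo l := by
  induction hn : l.length using Nat.strong_induction_on generalizing l with
  | _ n ih =>
    cases l with
    | nil => simp [pvARec, pvAltGo]
    | cons c rest =>
      subst hn
      by_cases h : pvIsWord c
      · have hrec := pvARec_true rest
        have ihd : pvARec false (rest.dropWhile pvIsWord) = pvAltGo (rest.dropWhile pvIsWord) :=
          ih (rest.dropWhile pvIsWord).length
            (Nat.lt_succ_of_le (List.length_dropWhile_le _ _)) _ rfl
        simp [pvARec, h, pvAltGo, hrec, ihd]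
      · have hc : pvIsWord c = false := by simpa using h
        have hrec := pvARec_false rest
        have ihd : pvARec false (rest.dropWhile (fun x => !pvIsWord x)) =
            pvAltGo (rest.dropWhile (fun x => !pvIsWord x)) :=
          ih (rest.dropWhile (fun x => !pvIsWord x)).length
            (Nat.lt_succ_of_le (List.length_dropWhile_le _ _)) _ rfl
        simp [pvARec, hc, pvAltGo, hrec, ihd]

-- ===== VERDICT (by name: the statement is the Claim_ definition above) =====
theorem cl_capitalize_py_spec : Claim_equal_cl_capitalize_py := by
  intro s _
  show cl_capitalize_py s = cl_capitalize_py_alt s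
  simp only [cl_capitalize_py, cl_capitalize_py_alt, pvFoldl_eq_aRec, pvARec_eq_altGo,
    List.nil_append]
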